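-- pv_equiv track=rewrite | github.com/ALEX11BR/everybodyCodes2024 | d11/p3.py | calc
-- ===== SOURCE A (Python) =====
-- def calc(termites: dict[str, list[str]], termite: str) -> int:
--     cache = {t: 0 for t in termites}
--     cache[termite] = 1
--     for _ in range(20):
--         newCache = {t: 0 for t in termites}
--         for t in cache:
--             for newElement in termites[t]:
--                 newCache[newElement] += cache[t]
--         cache = newCache
--     return sum(cache.values())
-- ===== SOURCE B (Python) =====
-- def calc(termites: dict[str, list[str]], termite: str) -> int:
--     # after(n)[t] = population after n generations starting from ONE termite of type t
--     # (transposed recursion: pull sums from children, then one final lookup).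
--     def after(n):
--         if n == 0:
--             return {t: 1 for t in termites}
--         prev = after(n - 1)
--         return {t: sum(prev[c] for c in termites[t]) for t in termites}
--     return after(20)[termite]
-- ===== Notes on version B (the rewrite author's own statement) =====
-- stated objective: alternative
-- what changed: B recurses on the generation count with the transposed DP: after(n) maps each type to the population one termite of that type produces in n generations (built by dict comprehensions pulling from children), and the answer is a single lookup after(20)[termite]; A instead seeds an indicator dict and pushes increments forward into a zeroed dict 20 times, then sums all values.
import Mathlib
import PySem

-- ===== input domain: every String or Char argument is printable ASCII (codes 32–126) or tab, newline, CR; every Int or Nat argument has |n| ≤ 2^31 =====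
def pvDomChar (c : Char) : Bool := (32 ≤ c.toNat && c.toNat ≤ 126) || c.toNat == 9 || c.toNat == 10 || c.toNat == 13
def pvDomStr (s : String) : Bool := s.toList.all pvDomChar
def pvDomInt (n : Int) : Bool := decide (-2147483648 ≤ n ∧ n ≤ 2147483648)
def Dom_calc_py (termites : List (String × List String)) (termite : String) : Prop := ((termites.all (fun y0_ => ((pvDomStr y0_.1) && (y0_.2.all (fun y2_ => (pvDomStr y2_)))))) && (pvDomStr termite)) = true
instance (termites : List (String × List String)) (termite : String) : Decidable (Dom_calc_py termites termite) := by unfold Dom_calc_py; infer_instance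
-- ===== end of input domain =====

-- B replaces A's forward push (seed indicator, push increments into a zeroed dict, sum all values)
-- by a recursion on the generation count: after(n) maps each type to the population one termite of
-- that type produces in n generations (dict comprehensions pulling from children), one final lookup.


-- ===== PORT A =====
def calc_py (termites : List (String × List String)) (termite : String) : Int :=
  let td := PySem.Dict.ofList termites
  let cache0 : PySem.Dict String Int :=
    (td.keys.foldl (fun d t => d.insert t 0) PySem.Dict.empty).insert termite 1
  let final :=
    (List.range 20).foldl (fun cache _ =>
      cache.keys.foldl (fun newCache t =>
          (td.getD t []).foldl
            (fun nc c => nc.modify c 0 (fun v => v + cache.getD t 0)) newCache)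
        (td.keys.foldl (fun d t => d.insert t 0) PySem.Dict.empty))
      cache0
  final.values.sum

-- ===== PORT B =====
-- after(n): dict comprehensions over td.keys (nodup), ported as Dict.ofList of the mapped pair list
def pvAfter (td : PySem.Dict String (List String)) : Nat → PySem.Dict String Int
  | 0 => PySem.Dict.ofList (td.keys.map (fun t => (t, (1 : Int))))
  | n + 1 =>
    let prev := pvAfter td n
    PySem.Dict.ofList (td.keys.map (fun t =>
      (t, ((td.getD t []).map (fun c => prev.getD c 0)).sum)))

def calc_py_alt (termites : List (String × List String)) (termite : String) : Int :=
  (pvAfter (PySem.Dict.ofList termites) 20).getD termite 0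

-- ===== PRECONDITION & SPEC =====
-- Pre_ excludes exactly the inputs on which the Python A raises KeyError: the seed type must be a
-- key of the dict, and every child type mentioned under a (non-shadowed) key must be a key too.
def Pre_calc_py (termites : List (String × List String)) (termite : String) : Prop :=
  termite ∈ (PySem.Dict.ofList termites).keys ∧
  ∀ t ∈ (PySem.Dict.ofList termites).keys,
    ∀ c ∈ (PySem.Dict.ofList termites).getD t [], c ∈ (PySem.Dict.ofList termites).keys
instance (termites : List (String × List String)) (termite : String) : Decidable (Pre_calc_py termites termite) := by unfold Pre_calc_py; infer_instance
def pvWitness_calc_py : (List (String × List String)) × String :=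
  ([("A", ["B", "B"]), ("B", ["A", "B"])], "A")
def Spec_calc_py (termites : List (String × List String)) (termite : String) (out : Int) : Prop := out = calc_py_alt termites termite
instance (termites : List (String × List String)) (termite : String) (out : Int) : Decidable (Spec_calc_py termites termite out) := by unfold Spec_calc_py; infer_instance

-- ===== CLAIM (what is proved, stated in full; the proofs are below) =====
def Claim_equal_calc_py : Prop := ∀ (termites : List (String × List String)) (termite : String), Dom_calc_py termites termite → Pre_calc_py termites termite → Spec_calc_py termites termite (calc_py termites termite)

-- ===== LEMMAS AND PROOFS =====

-- proof-side name for A's loop body (definitionally the one in the port)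
def pvStepA (td : PySem.Dict String (List String)) (cache : PySem.Dict String Int) : PySem.Dict String Int :=
  cache.keys.foldl (fun newCache t =>
      (td.getD t []).foldl (fun nc c => nc.modify c 0 (fun v => v + cache.getD t 0)) newCache)
    (td.keys.foldl (fun d t => d.insert t 0) PySem.Dict.empty)

-- A's step and B's recursion as linear maps on per-type functions
def pvFA (td : PySem.Dict String (List String)) (f : String → Int) (c : String) : Int :=
  (td.keys.map (fun t => ((td.getD t []).count c : Int) * f t)).sum

def pvFB (td : PySem.Dict String (List String)) (g : String → Int) (t : String) : Int :=
  ((td.getD t []).map g).sum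

lemma pvCalcA_eq (termites : List (String × List String)) (termite : String) :
    calc_py termites termite =
      ((List.range 20).foldl (fun c _ => pvStepA (PySem.Dict.ofList termites) c)
        (((PySem.Dict.ofList termites).keys.foldl (fun d t => d.insert t 0)
            PySem.Dict.empty).insert termite 1)).values.sum := rfl

lemma pvFoldlRangeIterate {α : Type} (F : α → α) (n : Nat) (a : α) :
    (List.range n).foldl (fun x _ => F x) a = F^[n] a := by
  induction n with
  | zero => simp
  | succ n ih => rw [List.range_succ, List.foldl_append, ih, Function.iterate_succ_apply']; rfl

lemma pvGetDInsertFold (K : List String) (g : String → Int) (d : PySem.Dict String Int) (x : String) :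
    (K.foldl (fun d t => d.insert t (g t)) d).getD x 0 = if x ∈ K then g x else d.getD x 0 := by
  induction K generalizing d with
  | nil => simp
  | cons k ks ih =>
    rw [List.foldl_cons, ih]
    by_cases hx : x ∈ ks
    · simp [hx]
    · by_cases hk : x = k
      · subst hk; simp
      · simp [hx, hk, PySem.Dict.getD_insert]

-- a dict comprehension {t: g(t) for t in K}, looked up
lemma pvGetDOfListMap (K : List String) (g : String → Int) (x : String) :
    (PySem.Dict.ofList (K.map (fun t => (t, g t)))).getD x 0 = if x ∈ K then g x else 0 := by
  have h : PySem.Dict.ofList (K.map (fun t => (t, g t)))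
      = K.foldl (fun d t => d.insert t (g t)) PySem.Dict.empty := by
    simp [PySem.Dict.ofList, PySem.Dict.update, List.foldl_map]
  rw [h, pvGetDInsertFold]
  simp

lemma pvModFoldGetD (cs : List String) (v : Int) (d : PySem.Dict String Int) (x : String) :
    (cs.foldl (fun nc c => nc.modify c 0 (fun w => w + v)) d).getD x 0
      = d.getD x 0 + (cs.count x : Int) * v := by
  induction cs generalizing d with
  | nil => simp
  | cons c cs ih =>
    rw [List.foldl_cons, ih, PySem.Dict.getD_modify, List.count_cons]
    by_cases h : x = c
    · subst h; simp; ring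
    · have : ¬ (c == x) = true := by simpa using fun h' => h h'.symm
      simp [h, this]

lemma pvAStepAuxGetD (td : PySem.Dict String (List String)) (cache : PySem.Dict String Int)
    (ts : List String) (d : PySem.Dict String Int) (x : String) :
    (ts.foldl (fun nC t =>
        (td.getD t []).foldl (fun nc c => nc.modify c 0 (fun w => w + cache.getD t 0)) nC) d).getD x 0
      = d.getD x 0 + (ts.map (fun t => ((td.getD t []).count x : Int) * cache.getD t 0)).sum := by
  induction ts generalizing d with
  | nil => simp
  | cons t ts ih => rw [List.foldl_cons, ih, pvModFoldGetD]; simp; ring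

lemma pvModFoldKeys (cs : List String) (v : Int) (d : PySem.Dict String Int)
    (h : ∀ c ∈ cs, c ∈ d.keys) :
    (cs.foldl (fun nc c => nc.modify c 0 (fun w => w + v)) d).keys = d.keys := by
  induction cs generalizing d with
  | nil => rfl
  | cons c cs ih =>
    have hc : d.contains c = true := (PySem.Dict.contains_iff_mem_keys d c).2 (h c (by simp))
    have hk : (d.modify c 0 (fun w => w + v)).keys = d.keys := by
      rw [PySem.Dict.keys_modify, PySem.Dict.keys_insert_of_contains _ _ hc]
    rw [List.foldl_cons, ih _ (by intro a ha; rw [hk]; exact h a (by simp [ha]))]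
    exact hk

lemma pvZeroDictKeys (K : List String) (hnd : K.Nodup) :
    (K.foldl (fun d t => d.insert t (0 : Int)) PySem.Dict.empty).keys = K := by
  rw [PySem.Dict.keys_foldl_insert K (fun _ _ => 0) PySem.Dict.empty, PySem.Dict.keys_empty,
    PySem.Set.update_nil_left, PySem.Set.ofList_eq_self_of_nodup _ hnd]

lemma pvStepAKeys (td : PySem.Dict String (List String)) (cache : PySem.Dict String Int)
    (hnd : td.keys.Nodup) (hk : cache.keys = td.keys)
    (hPre : ∀ t ∈ td.keys, ∀ c ∈ td.getD t [], c ∈ td.keys) :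
    (pvStepA td cache).keys = td.keys := by
  unfold pvStepA
  rw [hk]
  have aux : ∀ (ts : List String) (d : PySem.Dict String Int), d.keys = td.keys →
      (∀ t ∈ ts, t ∈ td.keys) →
      (ts.foldl (fun nC t =>
        (td.getD t []).foldl (fun nc c => nc.modify c 0 (fun w => w + cache.getD t 0)) nC) d).keys
        = td.keys := by
    intro ts
    induction ts with
    | nil => intro d hd _; exact hd
    | cons t ts ih =>
      intro d hd hts
      rw [List.foldl_cons]
      refine ih _ ?_ (fun a ha => hts a (by simp [ha]))
      rw [pvModFoldKeys _ _ _ (by intro c hc; rw [hd]; exact hPre t (hts t (by simp)) c hc)]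
      exact hd
  exact aux td.keys _ (pvZeroDictKeys td.keys hnd) (fun t ht => ht)

lemma pvStepAGetD (td : PySem.Dict String (List String)) (cache : PySem.Dict String Int) (x : String) :
    (pvStepA td cache).getD x 0
      = (cache.keys.map (fun t => ((td.getD t []).count x : Int) * cache.getD t 0)).sum := by
  unfold pvStepA
  rw [pvAStepAuxGetD]
  have h0 : (td.keys.foldl (fun d t => d.insert t (0 : Int)) PySem.Dict.empty).getD x 0 = 0 := by
    have := pvGetDInsertFold td.keys (fun _ => 0) PySem.Dict.empty x
    simpa using this
  rw [h0, zero_add]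

-- ---------- the pure summation facts ----------

lemma pvSumComm (l1 l2 : List String) (h : String → String → Int) :
    (l1.map (fun t => (l2.map (fun s => h t s)).sum)).sum
      = (l2.map (fun s => (l1.map (fun t => h t s)).sum)).sum := by
  induction l1 with
  | nil => simp
  | cons t l1 ih =>
    simp only [List.map_cons, List.sum_cons]
    rw [ih, ← PySem.List.sum_map_add_int]

lemma pvSumIndicator (c : String) (g : String → Int) :
    ∀ (K : List String), K.Nodup → c ∈ K → (K.map (fun t => if t = c then g t else 0)).sum = g c := by
  intro K
  induction K with
  | nil => intro _ hc; cases hc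
  | cons k K ih =>
    intro hnd hc
    rw [List.map_cons, List.sum_cons]
    rcases List.mem_cons.1 hc with h | h
    · subst h
      have hz : ∀ t ∈ K, (if t = c then g t else 0) = 0 := by
        intro t ht
        have : t ≠ c := fun e => (List.nodup_cons.1 hnd).1 (e ▸ ht)
        simp [this]
      rw [List.map_congr_left hz]
      simp
    · have hk : k ≠ c := fun e => (List.nodup_cons.1 hnd).1 (e ▸ h)
      rw [ih (List.nodup_cons.1 hnd).2 h]
      simp [hk]

lemma pvSumCount (K : List String) (hnd : K.Nodup) (cs : List String)
    (hcs : ∀ c ∈ cs, c ∈ K) (g : String → Int) :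
    (K.map (fun t => ((cs.count t : Nat) : Int) * g t)).sum = (cs.map g).sum := by
  induction cs with
  | nil => simp
  | cons c cs ih =>
    have h1 : ∀ t ∈ K, (((c :: cs).count t : Nat) : Int) * g t
        = ((cs.count t : Nat) : Int) * g t + (if t = c then g t else 0) := by
      intro t ht
      rw [List.count_cons]
      by_cases h : t = c
      · subst h; simp; ring
      · have : ¬ (c == t) = true := by simpa using fun h' => h h'.symm
        simp [h, this]
    rw [List.map_congr_left h1, PySem.List.sum_map_add_int,
      ih (fun a ha => hcs a (by simp [ha])),
      pvSumIndicator c g K hnd (hcs c (by simp))]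
    rw [List.map_cons, List.sum_cons]
    ring

lemma pvAdjointOne (td : PySem.Dict String (List String)) (hnd : td.keys.Nodup)
    (hPre : ∀ t ∈ td.keys, ∀ c ∈ td.getD t [], c ∈ td.keys) (f g : String → Int) :
    (td.keys.map (fun t => pvFA td f t * g t)).sum
      = (td.keys.map (fun t => f t * pvFB td g t)).sum := by
  unfold pvFA pvFB
  have h1 : ∀ t ∈ td.keys,
      (td.keys.map (fun s => ((td.getD s []).count t : Int) * f s)).sum * g t
        = (td.keys.map (fun s => ((td.getD s []).count t : Int) * f s * g t)).sum := by
    intro t _; rw [List.sum_map_mul_right]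
  rw [List.map_congr_left h1, pvSumComm]
  refine congrArg List.sum (List.map_congr_left ?_)
  intro s hs
  have h2 : ∀ t ∈ td.keys,
      ((td.getD s []).count t : Int) * f s * g t
        = f s * (((td.getD s []).count t : Int) * g t) := by intro t _; ring
  rw [List.map_congr_left h2, List.sum_map_mul_left,
    pvSumCount td.keys hnd (td.getD s []) (hPre s hs) g]

lemma pvAdjoint (td : PySem.Dict String (List String)) (hnd : td.keys.Nodup)
    (hPre : ∀ t ∈ td.keys, ∀ c ∈ td.getD t [], c ∈ td.keys) (f : String → Int) (n : Nat) :
    ∀ g : String → Int,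
    (td.keys.map (fun t => (pvFA td)^[n] f t * g t)).sum
      = (td.keys.map (fun t => f t * (pvFB td)^[n] g t)).sum := by
  induction n with
  | zero => intro g; simp
  | succ n ih =>
    intro g
    rw [Function.iterate_succ_apply']
    have h1 : (td.keys.map (fun t => pvFA td ((pvFA td)^[n] f) t * g t)).sum
        = (td.keys.map (fun t => (pvFA td)^[n] f t * pvFB td g t)).sum :=
      pvAdjointOne td hnd hPre _ g
    rw [h1, ih (pvFB td g)]
    simp [Function.iterate_succ_apply]

-- ---------- iteration invariant for A, recursion invariant for B ----------

lemma pvAIter (td : PySem.Dict String (List String)) (hnd : td.keys.Nodup)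
    (hPre : ∀ t ∈ td.keys, ∀ c ∈ td.getD t [], c ∈ td.keys)
    (n : Nat) (f : String → Int) (cache : PySem.Dict String Int)
    (hk : cache.keys = td.keys) (hf : ∀ x, cache.getD x 0 = f x) :
    ((pvStepA td)^[n] cache).keys = td.keys ∧
      ∀ x, ((pvStepA td)^[n] cache).getD x 0 = (pvFA td)^[n] f x := by
  induction n with
  | zero => exact ⟨hk, by simpa using hf⟩
  | succ n ih =>
    obtain ⟨ihk, ihd⟩ := ih
    rw [Function.iterate_succ_apply']
    refine ⟨pvStepAKeys td _ hnd ihk hPre, ?_⟩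
    intro x
    rw [pvStepAGetD, ihk, Function.iterate_succ_apply']
    have he : td.keys.map (fun t => ((td.getD t []).count x : Int) * ((pvStepA td)^[n] cache).getD t 0)
        = td.keys.map (fun t => ((td.getD t []).count x : Int) * (pvFA td)^[n] f t) :=
      List.map_congr_left (fun t _ => by rw [ihd t])
    rw [he]
    rfl

lemma pvAfterGetD (td : PySem.Dict String (List String))
    (hPre : ∀ t ∈ td.keys, ∀ c ∈ td.getD t [], c ∈ td.keys) (n : Nat) :
    ∀ x ∈ td.keys, (pvAfter td n).getD x 0 = (pvFB td)^[n] (fun _ => (1 : Int)) x := by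
  induction n with
  | zero =>
    intro x hx
    unfold pvAfter
    rw [pvGetDOfListMap]
    simp [hx]
  | succ n ih =>
    intro x hx
    show (PySem.Dict.ofList (td.keys.map (fun t =>
        (t, ((td.getD t []).map (fun c => (pvAfter td n).getD c 0)).sum)))).getD x 0 = _
    rw [pvGetDOfListMap]
    simp only [hx, if_true]
    rw [Function.iterate_succ_apply']
    unfold pvFB
    exact congrArg List.sum (List.map_congr_left (fun c hc => ih c (hPre x hx c hc)))

-- ===== VERDICT (by name: the statement is the Claim_ definition above) =====
theorem calc_py_spec : Claim_equal_calc_py := by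
  intro termites termite _hDom hPre
  obtain ⟨hmem, hPre2⟩ := hPre
  unfold Spec_calc_py calc_py_alt
  rw [pvCalcA_eq, pvFoldlRangeIterate]
  have hnd : (PySem.Dict.ofList termites).keys.Nodup := PySem.Dict.nodup_keys_ofList termites
  -- initial state of A: keys are the type list, values the indicator of the seed
  have hk0 : (((PySem.Dict.ofList termites).keys.foldl (fun d t => d.insert t (0 : Int))
      PySem.Dict.empty).insert termite 1).keys = (PySem.Dict.ofList termites).keys := by
    have hc : ((PySem.Dict.ofList termites).keys.foldl (fun d t => d.insert t (0 : Int))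
        PySem.Dict.empty).contains termite = true := by
      rw [PySem.Dict.contains_iff_mem_keys, pvZeroDictKeys _ hnd]; exact hmem
    rw [PySem.Dict.keys_insert_of_contains _ _ hc, pvZeroDictKeys _ hnd]
  have hf0 : ∀ x, (((PySem.Dict.ofList termites).keys.foldl (fun d t => d.insert t (0 : Int))
      PySem.Dict.empty).insert termite 1).getD x 0
        = (fun x => if x = termite then (1 : Int) else 0) x := by
    intro x
    rw [PySem.Dict.getD_insert]
    by_cases h : x = termite
    · simp [h]
    · have h0 := pvGetDInsertFold (PySem.Dict.ofList termites).keys (fun _ => 0) PySem.Dict.empty x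
      simp only [PySem.Dict.getD_empty, ite_self] at h0
      simp [h, h0]
  obtain ⟨hkA, hdA⟩ := pvAIter (PySem.Dict.ofList termites) hnd hPre2 20
    (fun x => if x = termite then (1 : Int) else 0) _ hk0 hf0
  -- A's answer: sum of the final values
  rw [PySem.Dict.values_eq_map_keys _ (by rw [hkA]; exact hnd) 0, hkA,
    List.map_congr_left (fun t _ => hdA t)]
  -- B's answer: the final lookup at the seed
  rw [pvAfterGetD (PySem.Dict.ofList termites) hPre2 20 termite hmem]
  -- the transposition argument
  have e1 : ((PySem.Dict.ofList termites).keys.map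
        (fun t => (pvFA (PySem.Dict.ofList termites))^[20] (fun x => if x = termite then (1 : Int) else 0) t)).sum
      = ((PySem.Dict.ofList termites).keys.map
        (fun t => (pvFA (PySem.Dict.ofList termites))^[20] (fun x => if x = termite then (1 : Int) else 0) t
          * (fun _ => (1 : Int)) t)).sum := by simp
  have e2 := pvAdjoint (PySem.Dict.ofList termites) hnd hPre2
    (fun x => if x = termite then (1 : Int) else 0) 20 (fun _ => (1 : Int))
  have e3 : ((PySem.Dict.ofList termites).keys.map
        (fun t => (if t = termite then (1 : Int) else 0)
          * (pvFB (PySem.Dict.ofList termites))^[20] (fun _ => (1 : Int)) t)).sum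
      = ((PySem.Dict.ofList termites).keys.map
        (fun t => if t = termite
          then (pvFB (PySem.Dict.ofList termites))^[20] (fun _ => (1 : Int)) t else 0)).sum := by
    refine congrArg List.sum (List.map_congr_left ?_)
    intro t _
    by_cases h : t = termite <;> simp [h]
  rw [e1, e2, e3,
    pvSumIndicator termite ((pvFB (PySem.Dict.ofList termites))^[20] (fun _ => (1 : Int)))
      _ hnd hmem]
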